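-- pv_equiv track=rewrite | github.com/RegionallyFamous/b-roll | _tools/pack-atlases.py | pack_shelf
-- ===== SOURCE A (Python) =====
-- MAX_ATLAS_W = 2048
--
-- GUTTER = 2  # 2px transparent gutter between frames to avoid bleed
--
-- def pack_shelf(sizes, max_w=MAX_ATLAS_W):
--     """Shelf packer. `sizes` is [(name, w, h)]. Returns (placements, atlas_w,
--     atlas_h) where placements is [(name, x, y, w, h)]. Sorts tallest first
--     so rows don't waste as much vertical space.
--     """
--     ordered = sorted(sizes, key=lambda s: (-s[2], -s[1]))
--     placements = []
--     cur_x = 0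
--     cur_y = 0
--     row_h = 0
--     used_w = 0
--     for name, w, h in ordered:
--         if cur_x + w + GUTTER > max_w and cur_x > 0:
--             cur_y += row_h + GUTTER
--             cur_x = 0
--             row_h = 0
--         placements.append((name, cur_x, cur_y, w, h))
--         cur_x += w + GUTTER
--         used_w = max(used_w, cur_x)
--         row_h = max(row_h, h)
--     atlas_h = cur_y + row_h
--     # Keep width tight — no sense reserving 2048px if we only used 1100.
--     atlas_w = min(max_w, used_w) if used_w > 0 else 1
--     atlas_h = atlas_h if atlas_h > 0 else 1
--     return placements, atlas_w, atlas_h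
-- ===== SOURCE B (Python) =====
-- MAX_ATLAS_W = 2048
--
-- GUTTER = 2
--
-- def pack_shelf(sizes, max_w=MAX_ATLAS_W):
--     """Two-phase shelf packer: first partition the tallest-first ordering into
--     rows (items, row height), then lay the rows out."""
--     ordered = sorted(sizes, key=lambda s: (-s[2], -s[1]))
--     # Phase 1: partition into rows.
--     rows = []
--     cur, cur_w, cur_h = [], 0, 0
--     for name, w, h in ordered:
--         if cur_w + w + GUTTER > max_w and cur_w > 0:
--             rows.append((cur, cur_h))
--             cur, cur_w, cur_h = [], 0, 0
--         cur.append((name, w, h))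
--         cur_w += w + GUTTER
--         cur_h = max(cur_h, h)
--     rows.append((cur, cur_h))
--     # Phase 2: lay the rows out.
--     placements = []
--     used_w = 0
--     y = 0
--     for items, rh in rows:
--         x = 0
--         for name, w, h in items:
--             placements.append((name, x, y, w, h))
--             x += w + GUTTER
--             used_w = max(used_w, x)
--         y += rh + GUTTER
--     atlas_h = y - GUTTER
--     atlas_w = min(max_w, used_w) if used_w > 0 else 1
--     atlas_h = atlas_h if atlas_h > 0 else 1
--     return placements, atlas_w, atlas_h
-- ===== Notes on version B (the rewrite author's own statement) =====
-- stated objective: alternative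
-- what changed: A's single fused loop carrying five running scalars is replaced by a two-phase decomposition: first partition the tallest-first ordering into rows (item lists with their heights), then a second pass lays each row out computing placements, used width and running y.
import Mathlib
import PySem

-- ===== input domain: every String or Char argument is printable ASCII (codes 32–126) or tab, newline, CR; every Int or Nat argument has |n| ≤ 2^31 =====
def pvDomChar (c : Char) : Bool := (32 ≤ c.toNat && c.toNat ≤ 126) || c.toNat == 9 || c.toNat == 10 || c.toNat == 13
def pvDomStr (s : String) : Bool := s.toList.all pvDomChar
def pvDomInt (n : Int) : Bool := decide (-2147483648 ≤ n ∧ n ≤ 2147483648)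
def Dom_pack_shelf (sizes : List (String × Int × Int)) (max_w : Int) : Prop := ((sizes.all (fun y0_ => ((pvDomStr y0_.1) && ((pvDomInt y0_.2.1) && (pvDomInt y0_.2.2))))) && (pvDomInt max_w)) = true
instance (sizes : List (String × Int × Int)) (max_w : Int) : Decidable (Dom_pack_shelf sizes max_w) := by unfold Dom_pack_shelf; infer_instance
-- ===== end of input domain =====

-- B replaces A's single fused loop by a two-phase decomposition (partition into rows, then lay the rows out); same cost, same return value.


def GUTTER : Int := 2

-- ===== PORT A =====
-- A's for-loop: state (placements, cur_x, cur_y, row_h, used_w)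
def packA_loop (max_w : Int) : List (String × Int × Int) →
    List (String × Int × Int × Int × Int) → Int → Int → Int → Int →
    (List (String × Int × Int × Int × Int)) × Int × Int × Int × Int
  | [], pl, cur_x, cur_y, row_h, used_w => (pl, cur_x, cur_y, row_h, used_w)
  | (name, w, h) :: rest, pl, cur_x, cur_y, row_h, used_w =>
    let st := if cur_x + w + GUTTER > max_w ∧ cur_x > 0
              then (0, cur_y + row_h + GUTTER, 0) else (cur_x, cur_y, row_h)
    packA_loop max_w rest (pl ++ [(name, st.1, st.2.1, w, h)])
      (st.1 + w + GUTTER) st.2.1 (max st.2.2 h) (max used_w (st.1 + w + GUTTER))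

def pack_shelf (sizes : List (String × Int × Int)) (max_w : Int) :
    (List (String × Int × Int × Int × Int)) × Int × Int :=
  let ordered := PySem.List.sorted2 sizes (fun s => -s.2.2) (fun s => -s.2.1)
  let r := packA_loop max_w ordered [] 0 0 0 0
  let atlas_h := r.2.2.1 + r.2.2.2.1
  (r.1, (if r.2.2.2.2 > 0 then min max_w r.2.2.2.2 else 1),
        (if atlas_h > 0 then atlas_h else 1))

-- ===== PORT B =====
-- Phase 1: partition the ordering into rows; state (rows, cur, cur_w, cur_h)
def packB_rows (max_w : Int) : List (String × Int × Int) →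
    List (List (String × Int × Int) × Int) → List (String × Int × Int) → Int → Int →
    List (List (String × Int × Int) × Int)
  | [], rows, cur, _cur_w, cur_h => rows ++ [(cur, cur_h)]
  | (name, w, h) :: rest, rows, cur, cur_w, cur_h =>
    let st := if cur_w + w + GUTTER > max_w ∧ cur_w > 0
              then (rows ++ [(cur, cur_h)], ([] : List (String × Int × Int)), 0, 0)
              else (rows, cur, cur_w, cur_h)
    packB_rows max_w rest st.1 (st.2.1 ++ [(name, w, h)])
      (st.2.2.1 + w + GUTTER) (max st.2.2.2 h)

-- Phase 2 inner loop over one row's items: state (placements, x, used_w), row at height y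
def packB_row : List (String × Int × Int) →
    List (String × Int × Int × Int × Int) → Int → Int → Int →
    (List (String × Int × Int × Int × Int)) × Int × Int
  | [], pl, x, used_w, _y => (pl, x, used_w)
  | (name, w, h) :: rest, pl, x, used_w, y =>
    packB_row rest (pl ++ [(name, x, y, w, h)]) (x + w + GUTTER)
      (max used_w (x + w + GUTTER)) y

-- Phase 2 outer loop over rows: state (placements, used_w, y)
def packB_layout : List (List (String × Int × Int) × Int) →
    List (String × Int × Int × Int × Int) → Int → Int →
    (List (String × Int × Int × Int × Int)) × Int × Int
  | [], pl, used_w, y => (pl, used_w, y)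
  | (items, rh) :: rest, pl, used_w, y =>
    let r := packB_row items pl 0 used_w y
    packB_layout rest r.1 r.2.2 (y + rh + GUTTER)

def pack_shelf_alt (sizes : List (String × Int × Int)) (max_w : Int) :
    (List (String × Int × Int × Int × Int)) × Int × Int :=
  let ordered := PySem.List.sorted2 sizes (fun s => -s.2.2) (fun s => -s.2.1)
  let rows := packB_rows max_w ordered [] [] 0 0
  let r := packB_layout rows [] 0 0
  let atlas_h := r.2.2 - GUTTER
  (r.1, (if r.2.1 > 0 then min max_w r.2.1 else 1),
        (if atlas_h > 0 then atlas_h else 1))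

-- ===== PRECONDITION & SPEC =====
def Spec_pack_shelf (sizes : List (String × Int × Int)) (max_w : Int) (out : (List (String × Int × Int × Int × Int)) × Int × Int) : Prop := out = pack_shelf_alt sizes max_w
instance (sizes : List (String × Int × Int)) (max_w : Int) (out : (List (String × Int × Int × Int × Int)) × Int × Int) : Decidable (Spec_pack_shelf sizes max_w out) := by unfold Spec_pack_shelf; infer_instance

-- ===== CLAIM (what is proved, stated in full; the proofs are below) =====
def Claim_equal_pack_shelf : Prop := ∀ (sizes : List (String × Int × Int)) (max_w : Int), Dom_pack_shelf sizes max_w → Spec_pack_shelf sizes max_w (pack_shelf sizes max_w)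

-- ===== LEMMAS AND PROOFS =====

-- packB_rows only appends to its `rows` accumulator
theorem packB_rows_acc (max_w : Int) (l : List (String × Int × Int))
    (rows : List (List (String × Int × Int) × Int)) (cur : List (String × Int × Int))
    (cw ch : Int) :
    packB_rows max_w l rows cur cw ch = rows ++ packB_rows max_w l [] cur cw ch := by
  induction l generalizing rows cur cw ch with
  | nil => simp [packB_rows]
  | cons it rest ih =>
    obtain ⟨name, w, h⟩ := it
    simp only [packB_rows]
    by_cases hc : cw + w + GUTTER > max_w ∧ cw > 0
    · simp only [if_pos hc]
      rw [ih (rows := rows ++ [(cur, ch)])]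
      conv_rhs => rw [ih]
      simp
    · simp only [if_neg hc]
      exact ih rows (cur ++ [(name, w, h)]) (cw + w + GUTTER) (max ch h)

-- map over the first row's item list
def mapFirst (g : List (String × Int × Int) → List (String × Int × Int)) :
    List (List (String × Int × Int) × Int) → List (List (String × Int × Int) × Int)
  | [] => []
  | (t, h) :: rs => (g t, h) :: rs

-- the current-row accumulator is a prefix of the first produced row
theorem packB_rows_cur (max_w : Int) (l : List (String × Int × Int))
    (cur : List (String × Int × Int)) (cw ch : Int) :
    packB_rows max_w l [] cur cw ch =
      mapFirst (cur ++ ·) (packB_rows max_w l [] [] cw ch) := by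
  induction l generalizing cur cw ch with
  | nil => simp [packB_rows, mapFirst]
  | cons it rest ih =>
    obtain ⟨name, w, h⟩ := it
    simp only [packB_rows]
    by_cases hc : cw + w + GUTTER > max_w ∧ cw > 0
    · simp only [if_pos hc]
      rw [packB_rows_acc max_w rest ([] ++ [(cur, ch)]),
          packB_rows_acc max_w rest ([] ++ [(([] : List (String × Int × Int)), ch)])]
      simp [mapFirst]
    · simp only [if_neg hc]
      rw [ih (cur := cur ++ [(name, w, h)]), ih (cur := [] ++ [(name, w, h)])]
      cases packB_rows max_w rest [] [] (cw + w + GUTTER) (max ch h) with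
      | nil => simp [mapFirst]
      | cons r rs => obtain ⟨t, rh⟩ := r; simp [mapFirst]

theorem packB_rows_ne (max_w : Int) (l : List (String × Int × Int))
    (rows : List (List (String × Int × Int) × Int)) (cur : List (String × Int × Int))
    (cw ch : Int) :
    packB_rows max_w l rows cur cw ch ≠ [] := by
  induction l generalizing rows cur cw ch with
  | nil => simp [packB_rows]
  | cons it rest ih =>
    obtain ⟨name, w, h⟩ := it
    simp only [packB_rows]
    apply ih

-- layout with the first row's x started at x0 (the generalisation the main lemma recurses on)
def layoutFrom (rs : List (List (String × Int × Int) × Int))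
    (pl : List (String × Int × Int × Int × Int)) (x0 uw y : Int) :
    (List (String × Int × Int × Int × Int)) × Int × Int :=
  match rs with
  | [] => (pl, uw, y)
  | (items, rh) :: rest =>
    let r := packB_row items pl x0 uw y
    packB_layout rest r.1 r.2.2 (y + rh + GUTTER)

theorem layoutFrom_zero (rs : List (List (String × Int × Int) × Int))
    (pl : List (String × Int × Int × Int × Int)) (uw y : Int) :
    layoutFrom rs pl 0 uw y = packB_layout rs pl uw y := by
  cases rs with
  | nil => rfl
  | cons r rest => obtain ⟨items, rh⟩ := r; rfl

-- consuming one item of the first row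
theorem layoutFrom_consFirst (rs : List (List (String × Int × Int) × Int))
    (hne : rs ≠ []) (name : String) (w h : Int)
    (pl : List (String × Int × Int × Int × Int)) (x0 uw y : Int) :
    layoutFrom (mapFirst ((name, w, h) :: ·) rs) pl x0 uw y =
      layoutFrom rs (pl ++ [(name, x0, y, w, h)]) (x0 + w + GUTTER)
        (max uw (x0 + w + GUTTER)) y := by
  cases rs with
  | nil => exact absurd rfl hne
  | cons r rest =>
    obtain ⟨items, rh⟩ := r
    simp [mapFirst, layoutFrom, packB_row]

-- MAIN: A's loop from a mid-row state equals phase 1 from that state followed by layout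
theorem packA_eq_phases (max_w : Int) (l : List (String × Int × Int))
    (pl : List (String × Int × Int × Int × Int)) (cw y ch uw : Int) :
    ((packA_loop max_w l pl cw y ch uw).1,
     (packA_loop max_w l pl cw y ch uw).2.2.2.2,
     (packA_loop max_w l pl cw y ch uw).2.2.1 +
       (packA_loop max_w l pl cw y ch uw).2.2.2.1 + GUTTER) =
      layoutFrom (packB_rows max_w l [] [] cw ch) pl cw uw y := by
  induction l generalizing pl cw y ch uw with
  | nil => simp [packA_loop, packB_rows, layoutFrom, packB_row, packB_layout]
  | cons it rest ih =>
    obtain ⟨name, w, h⟩ := it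
    simp only [packA_loop, packB_rows]
    by_cases hc : cw + w + GUTTER > max_w ∧ cw > 0
    · simp only [if_pos hc]
      rw [packB_rows_acc max_w rest ([] ++ [(([] : List (String × Int × Int)), ch)]),
          packB_rows_cur]
      have hne := packB_rows_ne max_w rest [] [] (0 + w + GUTTER) (max 0 h)
      simp only [List.nil_append, List.singleton_append, layoutFrom, packB_row]
      rw [← layoutFrom_zero, layoutFrom_consFirst _ hne name w h pl 0 uw (y + ch + GUTTER)]
      exact ih (pl ++ [(name, 0, y + ch + GUTTER, w, h)]) (0 + w + GUTTER)
        (y + ch + GUTTER) (max 0 h) (max uw (0 + w + GUTTER))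
    · simp only [if_neg hc]
      rw [packB_rows_cur]
      have hne := packB_rows_ne max_w rest [] [] (cw + w + GUTTER) (max ch h)
      simp only [List.nil_append, List.singleton_append]
      rw [layoutFrom_consFirst _ hne name w h pl cw uw y]
      exact ih (pl ++ [(name, cw, y, w, h)]) (cw + w + GUTTER) y (max ch h)
        (max uw (cw + w + GUTTER))

-- ===== VERDICT (by name: the statement is the Claim_ definition above) =====
theorem pack_shelf_spec : Claim_equal_pack_shelf := by
  intro sizes max_w _
  unfold Spec_pack_shelf pack_shelf pack_shelf_alt
  have h := packA_eq_phases max_w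
    (PySem.List.sorted2 sizes (fun s => -s.2.2) (fun s => -s.2.1)) [] 0 0 0 0
  rw [layoutFrom_zero] at h
  have h1 := congrArg Prod.fst h
  have h2 := congrArg (fun p => p.2.1) h
  have h3 := congrArg (fun p => p.2.2) h
  simp only at h1 h2 h3
  simp only [h1, h2]
  have : (packA_loop max_w
      (PySem.List.sorted2 sizes (fun s => -s.2.2) (fun s => -s.2.1)) [] 0 0 0 0).2.2.1 +
      (packA_loop max_w
      (PySem.List.sorted2 sizes (fun s => -s.2.2) (fun s => -s.2.1)) [] 0 0 0 0).2.2.2.1 =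
      (packB_layout (packB_rows max_w
        (PySem.List.sorted2 sizes (fun s => -s.2.2) (fun s => -s.2.1)) [] [] 0 0) [] 0 0).2.2 -
        GUTTER := by omega
  rw [this]
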